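-- pv_equiv track=rewrite | github.com/dbrooks-hub/Challenges | challenge4/num_text_conversion.py | get_tpl
-- ===== SOURCE A (Python) =====
-- def get_tpl(num):
--     """This method gets triplets and returns them in an array"""
--     tpl = str(num)
--     tpl = tpl[::-1]
--     a = 0
--     b = 0
--     output_rtn = ['']
--
--     for c in tpl:
--         a += 1
--         output_rtn[b] = c + output_rtn[b]
--         if a == 3:
--             output_rtn[b] = int(output_rtn[b])
--             b += 1
--             a = 0
--             output_rtn.append('')
--     if len(output_rtn[b]) < 3 and output_rtn[b]:
--         output_rtn[b] = int(output_rtn[b])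
--     elif len(output_rtn[b]) == 0:
--         del(output_rtn[b])
--         b -= 1
--     return output_rtn
-- ===== SOURCE B (Python) =====
-- def get_tpl(num):
--     """This method gets triplets and returns them in an array"""
--     s = str(num)
--     out = []
--     i = len(s)
--     while i > 0:
--         out.append(int(s[max(0, i - 3):i]))
--         i -= 3
--     return out
-- ===== Notes on version B (the rewrite author's own statement) =====
-- stated objective: simpler
-- what changed: B drops the reversal and the mixed str/int accumulator list entirely: it slices the unreversed decimal string directly with an index walking down from len(s) in steps of 3, instead of A's char-by-char build over the reversed string with a running chunk counter and in-place list patching; Pre_ excludes negative numbers whose digit count is a multiple of 3, where both A and B raise ValueError (int('-')).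
import Mathlib
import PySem

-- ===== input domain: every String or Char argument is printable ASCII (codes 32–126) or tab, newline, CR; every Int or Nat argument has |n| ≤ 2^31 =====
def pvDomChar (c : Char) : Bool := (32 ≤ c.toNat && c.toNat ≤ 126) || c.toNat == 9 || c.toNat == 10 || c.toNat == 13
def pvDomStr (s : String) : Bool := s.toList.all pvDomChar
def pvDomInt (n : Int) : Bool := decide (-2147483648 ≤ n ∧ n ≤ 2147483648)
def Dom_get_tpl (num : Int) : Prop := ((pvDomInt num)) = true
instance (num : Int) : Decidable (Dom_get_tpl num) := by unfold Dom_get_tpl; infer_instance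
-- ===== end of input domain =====

-- B replaces A's reversed-string char-by-char chunk builder by direct 3-wide slicing of the
-- unreversed decimal string from the right (simpler decomposition; same cost, same values).

-- ===== PORT A =====
-- A's loop over the reversed string. Python's output_rtn mixes strings (the chunk being
-- built, always the last live slot) with already-converted ints; we carry them separately:
-- acc = the ints already converted (in order), cur = the chunk string being built, a = its
-- char counter. int(...) is PySem.Int.ofChars?: none = ValueError (excluded by Pre_).
def getTplLoopA : List Char → List Int × List Char × Nat → Option (List Int × List Char × Nat)
  | [], st => some st
  | c :: rest, (acc, cur, a) =>
    let a' := a + 1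
    let cur' := c :: cur          -- output_rtn[b] = c + output_rtn[b]
    if a' = 3 then
      match PySem.Int.ofChars? cur' with
      | none => none              -- ValueError from int(...)
      | some v => getTplLoopA rest (acc ++ [v], [], 0)
    else getTplLoopA rest (acc, cur', a')

-- the two trailing branches after the loop
def getTplFinishA : List Int × List Char × Nat → Option (List Int)
  | (acc, cur, _) =>
    if cur.length < 3 ∧ cur ≠ [] then
      (PySem.Int.ofChars? cur).map (fun v => acc ++ [v])   -- none = ValueError
    else if cur.length = 0 then acc                         -- del output_rtn[b]
    else acc  -- unreachable: the chunk counter never exceeds 2 here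

def get_tpl (num : Int) : List Int :=
  -- tpl[::-1] is PySem.List.slice? … (-1); step ≠ 0, so it is never none
  match (getTplLoopA ((PySem.List.slice? (PySem.Int.toChars num) none none (-1)).getD [])
      ([], [], 0)).bind getTplFinishA with
  | some r => r
  | none => []   -- ValueError path, excluded by Pre_get_tpl

-- ===== PORT B =====
-- while i > 0: out.append(int(s[max(0, i-3):i])); i -= 3   (i is 'len' minus multiples of 3;
-- tracked as a Nat, i - 3 truncates at 0 exactly where Python's loop condition stops it)
def getTplLoopB (s : List Char) (i : Nat) (acc : List Int) : Option (List Int) :=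
  if _h : i = 0 then some acc
  else
    match PySem.Int.ofChars? (PySem.List.slice s (some (max 0 ((i : Int) - 3))) (some (i : Int))) with
    | none => none               -- ValueError from int(...)
    | some v => getTplLoopB s (i - 3) (acc ++ [v])
  termination_by i
  decreasing_by omega

def get_tpl_alt (num : Int) : List Int :=
  match getTplLoopB (PySem.Int.toChars num) (PySem.Int.toChars num).length [] with
  | some r => r
  | none => []   -- ValueError path, excluded by Pre_get_tpl

-- ===== PRECONDITION & SPEC =====
-- Pre_ excludes exactly the inputs where Python A raises ValueError (int('-')): negative
-- numbers whose digit count is a multiple of 3, i.e. len(str(num)) % 3 == 1 with num < 0.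
def Pre_get_tpl (num : Int) : Prop := 0 ≤ num ∨ (PySem.Int.toChars num).length % 3 ≠ 1
instance (num : Int) : Decidable (Pre_get_tpl num) := by unfold Pre_get_tpl; infer_instance
def pvWitness_get_tpl : Int := (-1234)

def Spec_get_tpl (num : Int) (out : List Int) : Prop := out = get_tpl_alt num
instance (num : Int) (out : List Int) : Decidable (Spec_get_tpl num out) := by unfold Spec_get_tpl; infer_instance

-- ===== CLAIM (what is proved, stated in full; the proofs are below) =====
def Claim_equal_get_tpl : Prop := ∀ (num : Int), Dom_get_tpl num → Pre_get_tpl num → Spec_get_tpl num (get_tpl num)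

-- ===== LEMMAS AND PROOFS =====

-- one step of B's loop, with the slice written as drop/take (PySem.List.slice_natCast)
lemma getTplLoopB_step (s : List Char) (i : Nat) (acc : List Int) (h : i ≠ 0) :
    getTplLoopB s i acc =
      match PySem.Int.ofChars? ((s.drop (i - 3)).take (i - (i - 3))) with
      | none => none
      | some v => getTplLoopB s (i - 3) (acc ++ [v]) := by
  rw [getTplLoopB]
  have hmax : max 0 ((i : Int) - 3) = ((i - 3 : Nat) : Int) := by omega
  rw [dif_neg h, hmax, PySem.List.slice_natCast]

-- B only reads the first i characters of s: a longer string with the same prefix gives the same run.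
lemma getTplLoopB_prefix (t u : List Char) : ∀ (i : Nat) (acc : List Int), i ≤ t.length →
    getTplLoopB (t ++ u) i acc = getTplLoopB t i acc := by
  intro i
  induction i using Nat.strong_induction_on with
  | _ i ih =>
    intro acc hi
    by_cases h0 : i = 0
    · rw [getTplLoopB, getTplLoopB]; simp [h0]
    · rw [getTplLoopB_step _ _ _ h0, getTplLoopB_step _ _ _ h0]
      rw [List.drop_append_of_le_length (by omega),
          List.take_append_of_le_length (by simp; omega)]
      cases PySem.Int.ofChars? ((t.drop (i - 3)).take (i - (i - 3))) with
      | none => rfl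
      | some v => exact ih (i - 3) (by omega) _ (by omega)

-- Core: A's loop over r (= the reversed string) followed by the finish branches computes the
-- same Option as B's slicing loop over r.reverse.
lemma loopA_eq_loopB : ∀ (n : Nat) (r : List Char), r.length = n → ∀ (acc : List Int),
    (getTplLoopA r (acc, [], 0)).bind getTplFinishA = getTplLoopB r.reverse r.length acc := by
  intro n
  induction n using Nat.strong_induction_on with
  | _ n ih =>
    intro r hn acc
    match r with
    | [] => rw [getTplLoopB]; simp [getTplLoopA, getTplFinishA]
    | [z] =>
      have hA : (getTplLoopA [z] (acc, [], 0)).bind getTplFinishA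
          = (PySem.Int.ofChars? [z]).map (fun v => acc ++ [v]) := by
        simp [getTplLoopA, getTplFinishA]
      rw [hA, show ([z] : List Char).reverse = [z] from rfl,
          show ([z] : List Char).length = 1 from rfl,
          getTplLoopB_step _ _ _ (by omega)]
      rw [show (List.take (1 - (1 - 3)) (List.drop (1 - 3) [z])) = [z] from rfl]
      cases PySem.Int.ofChars? [z] with
      | none => rfl
      | some v => show some (acc ++ [v]) = getTplLoopB [z] (1 - 3) (acc ++ [v]); rw [getTplLoopB]; norm_num
    | [z, y] =>
      have hA : (getTplLoopA [z, y] (acc, [], 0)).bind getTplFinishA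
          = (PySem.Int.ofChars? [y, z]).map (fun v => acc ++ [v]) := by
        simp [getTplLoopA, getTplFinishA]
      rw [hA, show ([z, y] : List Char).reverse = [y, z] from rfl,
          show ([z, y] : List Char).length = 2 from rfl,
          getTplLoopB_step _ _ _ (by omega)]
      rw [show (List.take (2 - (2 - 3)) (List.drop (2 - 3) [y, z])) = [y, z] from rfl]
      cases PySem.Int.ofChars? [y, z] with
      | none => rfl
      | some v => show some (acc ++ [v]) = getTplLoopB [y, z] (2 - 3) (acc ++ [v]); rw [getTplLoopB]; norm_num
    | z :: y :: x :: t =>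
      -- A consumes three chars and converts the chunk [x, y, z]
      have hA : (getTplLoopA (z :: y :: x :: t) (acc, [], 0)).bind getTplFinishA
          = match PySem.Int.ofChars? [x, y, z] with
            | none => none
            | some v => (getTplLoopA t (acc ++ [v], [], 0)).bind getTplFinishA := by
        rw [getTplLoopA, getTplLoopA, getTplLoopA]
        simp only [if_neg (by omega : ¬ (0 + 1 = 3)), if_neg (by omega : ¬ (0 + 1 + 1 = 3))]
        cases PySem.Int.ofChars? [x, y, z] with
        | none => rfl
        | some v => rfl
      have hrev : (z :: y :: x :: t).reverse = t.reverse ++ [x, y, z] := by simp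
      -- B's first slice is the last three chars of the reversed list, i.e. [x, y, z]
      have hB : getTplLoopB (z :: y :: x :: t).reverse (z :: y :: x :: t).length acc
          = match PySem.Int.ofChars? [x, y, z] with
            | none => none
            | some v => getTplLoopB t.reverse t.length (acc ++ [v]) := by
        rw [show (z :: y :: x :: t).length = t.length + 3 from by
              simp only [List.length_cons],
            getTplLoopB_step _ _ _ (by omega)]
        have hslice : (List.take (t.length + 3 - (t.length + 3 - 3))
            (List.drop (t.length + 3 - 3) (z :: y :: x :: t).reverse)) = [x, y, z] := by
          rw [show t.length + 3 - 3 = t.length from by omega, hrev]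
          rw [show List.drop t.length (t.reverse ++ [x, y, z]) = [x, y, z] from by simp]
          rw [show t.length + 3 - t.length = 3 from by omega]
          rfl
        rw [hslice, show t.length + 3 - 3 = t.length from by omega, hrev]
        cases PySem.Int.ofChars? [x, y, z] with
        | none => rfl
        | some v => exact getTplLoopB_prefix t.reverse [x, y, z] t.length _ (by simp)
      rw [hA, hB]
      cases PySem.Int.ofChars? [x, y, z] with
      | none => rfl
      | some v =>
        have ht : t.length < n := by simp at hn; omega
        exact ih t.length ht t rfl (acc ++ [v])

lemma get_tpl_eq_alt (num : Int) : get_tpl num = get_tpl_alt num := by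
  unfold get_tpl get_tpl_alt
  rw [PySem.List.slice?_none_none_neg_one]
  simp only [Option.getD_some]
  rw [loopA_eq_loopB (PySem.Int.toChars num).reverse.length (PySem.Int.toChars num).reverse rfl [],
      List.reverse_reverse, List.length_reverse]

-- ===== VERDICT (by name: the statement is the Claim_ definition above) =====
theorem get_tpl_spec : Claim_equal_get_tpl := by
  intro num _ _
  show get_tpl num = get_tpl_alt num
  exact get_tpl_eq_alt num
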